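-- pv_equiv track=rewrite | github.com/kcajheish/leetcode | 646_ maximum_length_pair_chain.py | findLongestChain_dp
-- ===== SOURCE A (Python) =====
-- def findLongestChain_dp(pairs):
--     """
--     time complexity: O(N^2)
--     space complexity: O(N)
--     """
--     dp = [1] * len(pairs)
--     for i in range(len(pairs)):
--         for j in range(i):
--             if pairs[j][1] < pairs[i][0]:
--                 dp[i] = max(
--                     dp[i],
--                     dp[j] + 1
--                 )
--     return max(dp)
-- ===== SOURCE B (Python) =====
-- def findLongestChain_dp(pairs):
--     """Patience-style O(n log n): one left-to-right pass keeping only an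
--     undominated frontier of (end, chainlen) records, sorted by end with
--     strictly increasing chainlen; binary search answers "best chain whose
--     end is below this start" and dominated records are evicted on insert."""
--     env = []   # frontier: ends nondecreasing, chain lengths strictly increasing
--     best = 0
--     for start, end in pairs:
--         # bisect: number of frontier records with recorded end < start
--         lo, hi = 0, len(env)
--         while lo < hi:
--             mid = (lo + hi) // 2
--             if env[mid][0] < start:
--                 lo = mid + 1
--             else:
--                 hi = mid
--         d = (env[lo - 1][1] if lo else 0) + 1
--         # insertion point for (end, d): first record with recorded end >= end
--         lo2, hi2 = 0, len(env)
--         while lo2 < hi2: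
--             mid = (lo2 + hi2) // 2
--             if env[mid][0] < end:
--                 lo2 = mid + 1
--             else:
--                 hi2 = mid
--         if lo2 and env[lo2 - 1][1] >= d:
--             pass  # dominated: an earlier end already achieves >= d
--         else:
--             k = lo2
--             while k < len(env) and env[k][1] <= d:
--                 k += 1  # evict records (end, d) now dominates
--             env[lo2:k] = [(end, d)]
--         if d > best:
--             best = d
--     return best
-- ===== Notes on version B (the rewrite author's own statement) =====
-- stated objective: faster
-- what changed: Replaces the quadratic index-indexed DP (for each pair, an inner scan over all earlier pairs) by a single pass maintaining a sorted undominated frontier of (end, chain-length) records: a binary search answers 'best chain ending before this start' and dominated records are evicted on insert, removing the inner scan entirely.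
import Mathlib
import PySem

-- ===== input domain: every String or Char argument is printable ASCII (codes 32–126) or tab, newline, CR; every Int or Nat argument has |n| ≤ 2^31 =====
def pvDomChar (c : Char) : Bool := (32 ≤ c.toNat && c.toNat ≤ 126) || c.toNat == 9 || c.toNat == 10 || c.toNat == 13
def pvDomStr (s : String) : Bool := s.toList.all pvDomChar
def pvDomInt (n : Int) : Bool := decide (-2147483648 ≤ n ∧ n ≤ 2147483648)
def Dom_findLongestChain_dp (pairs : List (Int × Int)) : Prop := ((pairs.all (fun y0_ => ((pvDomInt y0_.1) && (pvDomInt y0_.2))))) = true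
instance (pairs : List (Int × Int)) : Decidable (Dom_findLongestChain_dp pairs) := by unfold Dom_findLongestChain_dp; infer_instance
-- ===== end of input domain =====

-- B replaces A's quadratic DP by one pass over a sorted undominated frontier with binary search (measured faster); Pre_ excludes only [], where A's max() raises ValueError.

-- ===== PORT A =====
-- inner 'for j in range(i)' loop: updates dp[i] from dp[j] when pairs[j][1] < pairs[i][0]
def innerA (pairs : List (Int × Int)) (dp : List Int) (i : Int) : List Int :=
  (PySem.List.pyRange 0 i 1).foldl (fun dp j =>
    if (PySem.List.pyGetD pairs j (0, 0)).2 < (PySem.List.pyGetD pairs i (0, 0)).1 then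
      PySem.List.pySetD dp i (max (PySem.List.pyGetD dp i 0) (PySem.List.pyGetD dp j 0 + 1))
    else dp) dp

def findLongestChain_dp (pairs : List (Int × Int)) : Int :=
  let dp : List Int := List.replicate pairs.length 1
  let dp := (PySem.List.pyRange 0 (PySem.List.len pairs) 1).foldl (innerA pairs) dp
  (PySem.List.max? dp (fun v => v)).getD 0   -- max(dp): none (ValueError) exactly when pairs = [], excluded by Pre_

-- ===== PORT B =====
-- the hand-written 'while lo < hi' bisection of Source B; lo/hi are Python ints that stay in
-- [0, len(env)], tracked as Nat ((lo+hi)//2 on nonnegatives is Nat division — exact here)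
def bsLt (env : List (Int × Int)) (x : Int) (lo hi : Nat) : Nat :=
  if _h : lo < hi then
    let mid := (lo + hi) / 2
    if (env.getD mid (0, 0)).1 < x then bsLt env x (mid + 1) hi
    else bsLt env x lo mid
  else lo
termination_by hi - lo
decreasing_by all_goals omega

-- the 'while k < len(env) and env[k][1] <= d: k += 1' eviction scan
def scanLe (env : List (Int × Int)) (d : Int) (k : Nat) : Nat :=
  if _h : k < env.length then
    if (env.getD k (0, 0)).2 ≤ d then scanLe env d (k + 1) else k
  else k
termination_by env.length - k

-- one iteration of Source B's 'for start, end in pairs' loop (env[i] accesses are in range: List.getD is exact)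
def stepB (st : List (Int × Int) × Int) (p : Int × Int) : List (Int × Int) × Int :=
  let env := st.1
  let lo := bsLt env p.1 0 env.length
  let d := (if lo ≠ 0 then (env.getD (lo - 1) (0, 0)).2 else 0) + 1
  let lo2 := bsLt env p.2 0 env.length
  let env' :=
    if lo2 ≠ 0 ∧ d ≤ (env.getD (lo2 - 1) (0, 0)).2 then env
    else
      let k := scanLe env d lo2
      env.take lo2 ++ (p.2, d) :: env.drop k
  (env', if d > st.2 then d else st.2)

def findLongestChain_dp_alt (pairs : List (Int × Int)) : Int :=
  (pairs.foldl stepB ([], 0)).2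

-- ===== PRECONDITION & SPEC =====
-- Pre_ excludes only the empty list, on which A's max(dp) raises ValueError.
def Pre_findLongestChain_dp (pairs : List (Int × Int)) : Prop := pairs ≠ []
instance (pairs : List (Int × Int)) : Decidable (Pre_findLongestChain_dp pairs) := by unfold Pre_findLongestChain_dp; infer_instance
def pvWitness_findLongestChain_dp : (List (Int × Int)) := ([(0, 1), (2, 3)])

def Spec_findLongestChain_dp (pairs : List (Int × Int)) (out : Int) : Prop := out = findLongestChain_dp_alt pairs
instance (pairs : List (Int × Int)) (out : Int) : Decidable (Spec_findLongestChain_dp pairs out) := by unfold Spec_findLongestChain_dp; infer_instance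

-- ===== CLAIM (what is proved, stated in full; the proofs are below) =====
def Claim_equal_findLongestChain_dp : Prop := ∀ (pairs : List (Int × Int)), Dom_findLongestChain_dp pairs → Pre_findLongestChain_dp pairs → Spec_findLongestChain_dp pairs (findLongestChain_dp pairs)


-- ===== LEMMAS AND PROOFS =====

-- qmax l x: the best chain value among records of l whose end lies below x (0 if none) —
-- the common abstraction both ports compute.
def qstep (x : Int) (a : Int) (p : Int × Int) : Int := if p.1 < x then max a p.2 else a

def qmax (l : List (Int × Int)) (x : Int) : Int := l.foldl (qstep x) 0

-- reference pass: full history of (end, chain-length) records plus the running best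
def stepR (st : List (Int × Int) × Int) (p : Int × Int) : List (Int × Int) × Int :=
  let d := qmax st.1 p.1 + 1
  (st.1 ++ [(p.2, d)], if d > st.2 then d else st.2)

def runR (pairs : List (Int × Int)) : List (Int × Int) × Int := pairs.foldl stepR ([], 0)

def Mono (env : List (Int × Int)) : Prop := env.Pairwise (fun p q => p.1 ≤ q.1 ∧ p.2 < q.2)

def PosL (l : List (Int × Int)) : Prop := ∀ p ∈ l, 1 ≤ p.2

lemma le_foldl_qstep (l : List (Int × Int)) (x a : Int) : a ≤ l.foldl (qstep x) a := by
  induction l generalizing a with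
  | nil => simp
  | cons p t ih =>
    refine le_trans ?_ (ih (qstep x a p))
    unfold qstep; split <;> simp

lemma qmax_nonneg (l : List (Int × Int)) (x : Int) : 0 ≤ qmax l x := le_foldl_qstep l x 0

lemma foldl_qstep_mono (l : List (Int × Int)) (x : Int) :
    ∀ a b : Int, a ≤ b → l.foldl (qstep x) a ≤ l.foldl (qstep x) b := by
  induction l with
  | nil => intro a b h; simpa using h
  | cons p t ih =>
    intro a b h
    exact ih _ _ (by unfold qstep; split <;> omega)

lemma foldl_qstep_init (l : List (Int × Int)) (x : Int) (hpos : ∀ p ∈ l, 0 ≤ p.2) :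
    ∀ a : Int, 0 ≤ a → l.foldl (qstep x) a = max a (qmax l x) := by
  induction l with
  | nil => intro a ha; simp [qmax]; omega
  | cons p t ih =>
    intro a ha
    have hp : (0:Int) ≤ p.2 := hpos p (by simp)
    have ht : ∀ q ∈ t, (0:Int) ≤ q.2 := fun q hq => hpos q (by simp [hq])
    have hq0 : (0:Int) ≤ qmax t x := qmax_nonneg t x
    show List.foldl (qstep x) (qstep x a p) t = max a (qmax (p :: t) x)
    have h1 : List.foldl (qstep x) (qstep x a p) t = max (qstep x a p) (qmax t x) :=
      ih ht _ (by unfold qstep; split <;> omega)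
    have h2 : qmax (p :: t) x = max (qstep x 0 p) (qmax t x) :=
      ih ht _ (by unfold qstep; split <;> omega)
    rw [h1, h2]
    unfold qstep; split <;> omega

lemma qmax_append (l1 l2 : List (Int × Int)) (x : Int) (hpos : ∀ p ∈ l2, 0 ≤ p.2) :
    qmax (l1 ++ l2) x = max (qmax l1 x) (qmax l2 x) := by
  unfold qmax
  rw [List.foldl_append]
  exact foldl_qstep_init l2 x hpos _ (qmax_nonneg l1 x)

lemma qmax_singleton (e d x : Int) : qmax [(e, d)] x = if e < x then max 0 d else 0 := by
  simp [qmax, qstep]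

lemma le_qmax_of_mem (l : List (Int × Int)) (x : Int) (p : Int × Int) (hp : p ∈ l)
    (hc : p.1 < x) : p.2 ≤ qmax l x := by
  induction l with
  | nil => simp at hp
  | cons q t ih =>
    rcases List.mem_cons.mp hp with h | h
    · subst h
      refine le_trans ?_ (le_foldl_qstep t x (qstep x 0 p))
      unfold qstep; simp [hc]
    · have := ih h
      show _ ≤ List.foldl (qstep x) (qstep x 0 q) t
      calc p.2 ≤ List.foldl (qstep x) 0 t := this
        _ ≤ List.foldl (qstep x) (qstep x 0 q) t :=
            foldl_qstep_mono t x 0 _ (by unfold qstep; split <;> omega)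

lemma qmax_eq_zero (l : List (Int × Int)) (x : Int) (h : ∀ p ∈ l, ¬ p.1 < x) :
    qmax l x = 0 := by
  induction l with
  | nil => rfl
  | cons q t ih =>
    have : qstep x 0 q = 0 := by unfold qstep; simp [h q (by simp)]
    show List.foldl (qstep x) (qstep x 0 q) t = 0
    rw [this]; exact ih (fun p hp => h p (by simp [hp]))

lemma foldl_qstep_le (l : List (Int × Int)) (x d : Int)
    (h : ∀ p ∈ l, p.1 < x → p.2 ≤ d) :
    ∀ a : Int, a ≤ d → l.foldl (qstep x) a ≤ d := by
  induction l with
  | nil => intro a ha; simpa using ha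
  | cons q t ih =>
    intro a ha
    refine ih (fun p hp hc => h p (by simp [hp]) hc) _ ?_
    unfold qstep; split
    · have := h q (by simp) (by assumption); omega
    · exact ha

lemma qmax_le (l : List (Int × Int)) (x d : Int) (hd : 0 ≤ d)
    (h : ∀ p ∈ l, p.1 < x → p.2 ≤ d) : qmax l x ≤ d :=
  foldl_qstep_le l x d h 0 hd

lemma qmax_all_match (l : List (Int × Int)) (x : Int) (hne : l ≠ [])
    (hall : ∀ p ∈ l, p.1 < x) (hpos : ∀ p ∈ l, 0 ≤ p.2)
    (hsort : l.Pairwise (fun p q => p.2 ≤ q.2)) :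
    qmax l x = (l.getLast hne).2 := by
  induction l with
  | nil => simp at hne
  | cons q t ih =>
    cases t with
    | nil =>
      simp [qmax, qstep, hall q (by simp)]
      have := hpos q (by simp); omega
    | cons r u =>
      have hne' : r :: u ≠ [] := by simp
      have h1 : qmax (q :: r :: u) x = max (qstep x 0 q) (qmax (r :: u) x) := by
        show List.foldl (qstep x) (qstep x 0 q) (r :: u) = _
        refine foldl_qstep_init _ x (fun p hp => hpos p (List.mem_cons_of_mem q hp)) _ ?_
        unfold qstep; split
        · have := hpos q (by simp); omega
        · omega
      rw [h1, ih hne' (fun p hp => hall p (by simp [hp])) (fun p hp => hpos p (by simp [hp]))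
        (List.Pairwise.sublist (by simp) hsort)]
      have hq : qstep x 0 q = q.2 := by
        unfold qstep; simp [hall q (by simp)]
        have := hpos q (by simp); omega
      rw [hq, List.getLast_cons hne']
      have hlast : (r :: u).getLast hne' ∈ r :: u := List.getLast_mem hne'
      have : q.2 ≤ ((r :: u).getLast hne').2 := (List.pairwise_cons.mp hsort).1 _ hlast
      omega

-- characterization of a downward-closed cut point in a list
def IsCut (P : Int × Int → Prop) (l : List (Int × Int)) (t : Nat) : Prop :=
  t ≤ l.length ∧ ∀ i (h : i < l.length), (P l[i] ↔ i < t)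

lemma exists_cut (P : Int × Int → Prop) [DecidablePred P] (l : List (Int × Int))
    (hdc : ∀ i j (hi : i < l.length) (hj : j < l.length), i ≤ j → P l[j] → P l[i]) :
    ∃ t, IsCut P l t := by
  induction l with
  | nil => exact ⟨0, by simp [IsCut]⟩
  | cons q t ih =>
    by_cases hq : P q
    · obtain ⟨m, hm1, hm2⟩ := ih (fun i j hi hj hij hP =>
        hdc (i+1) (j+1) (by simpa using hi) (by simpa using hj) (by omega) (by simpa using hP))
      refine ⟨m + 1, by simpa using hm1, ?_⟩
      intro i hi
      cases i with
      | zero => simpa using hq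
      | succ k =>
        have hk : k < t.length := by simpa using hi
        have hmk := hm2 k hk
        have hidx : (q :: t)[k+1]'hi = t[k]'hk := by simp
        rw [hidx]
        constructor
        · intro h; exact Nat.succ_lt_succ (hmk.mp h)
        · intro h; exact hmk.mpr (Nat.lt_of_succ_lt_succ h)
    · refine ⟨0, by simp, ?_⟩
      intro i hi
      simp only [Nat.not_lt_zero, iff_false]
      intro hP
      exact hq (hdc 0 i (by simp) hi (by omega) hP)

lemma bsLt_spec (env : List (Int × Int)) (x : Int) (t : Nat)
    (hcut : IsCut (fun p => p.1 < x) env t) :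
    ∀ n lo hi, hi - lo ≤ n → lo ≤ t → t ≤ hi → hi ≤ env.length → bsLt env x lo hi = t := by
  intro n
  induction n with
  | zero =>
    intro lo hi h1 h2 h3 h4
    rw [bsLt]; simp [show ¬ lo < hi by omega]; omega
  | succ m ih =>
    intro lo hi h1 h2 h3 h4
    rw [bsLt]
    by_cases hlh : lo < hi
    · simp only [hlh, dif_pos]
      have hmid : (lo + hi) / 2 < env.length := by omega
      have hg : env.getD ((lo + hi) / 2) (0, 0) = env[(lo + hi) / 2] := List.getD_eq_getElem env (0,0) hmid
      rw [hg]
      have hiff := hcut.2 ((lo + hi) / 2) hmid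
      by_cases hc : env[(lo + hi) / 2].1 < x
      · have : (lo + hi) / 2 < t := hiff.mp hc
        simp only [hc, if_pos]
        exact ih _ _ (by omega) (by omega) h3 h4
      · have : ¬ (lo + hi) / 2 < t := fun hlt => hc (hiff.mpr hlt)
        simp only [hc, if_false]
        exact ih _ _ (by omega) h2 (by omega) (by omega)
    · simp [hlh]; omega

lemma scanLe_spec (env : List (Int × Int)) (d : Int) (tv : Nat)
    (hcut : IsCut (fun p => p.2 ≤ d) env tv) :
    ∀ n k0, env.length - k0 ≤ n → k0 ≤ env.length → scanLe env d k0 = max k0 tv := by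
  intro n
  induction n with
  | zero =>
    intro k0 h1 h2
    rw [scanLe]; simp [show ¬ k0 < env.length by omega]
    have := hcut.1; omega
  | succ m ih =>
    intro k0 h1 h2
    rw [scanLe]
    by_cases hk : k0 < env.length
    · simp only [hk, dif_pos]
      rw [List.getD_eq_getElem env (0,0) hk]
      have hiff := hcut.2 k0 hk
      by_cases hc : env[k0].2 ≤ d
      · have : k0 < tv := hiff.mp hc
        simp only [hc, if_pos]
        rw [ih (k0+1) (by omega) (by omega)]
        omega
      · have : ¬ k0 < tv := fun hlt => hc (hiff.mpr hlt)
        simp only [hc, if_false]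
        omega
    · simp [hk]
      have := hcut.1; omega

lemma mem_take_idx {env : List (Int × Int)} {t : Nat} {q : Int × Int}
    (hq : q ∈ env.take t) : ∃ i, ∃ h : i < env.length, i < t ∧ q = env[i] := by
  obtain ⟨i, hi, hqi⟩ := List.mem_iff_getElem.mp hq
  have h12 : i < env.length ∧ i < t := by simp [List.length_take] at hi; omega
  exact ⟨i, h12.1, h12.2, by rw [← hqi]; exact List.getElem_take⟩

lemma mem_drop_idx {env : List (Int × Int)} {t : Nat} {q : Int × Int}
    (hq : q ∈ env.drop t) : ∃ i, ∃ h : i < env.length, t ≤ i ∧ q = env[i] := by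
  obtain ⟨i, hi, hqi⟩ := List.mem_iff_getElem.mp hq
  have h1 : t + i < env.length := by simp at hi; omega
  exact ⟨t + i, h1, by omega, by rw [← hqi]; exact List.getElem_drop⟩

lemma cut_query (env : List (Int × Int)) (x : Int) (ts : Nat)
    (hm : Mono env) (hpos : PosL env) (hcut : IsCut (fun q => q.1 < x) env ts) :
    (if ts ≠ 0 then (env.getD (ts - 1) (0, 0)).2 else 0) = qmax env x := by
  by_cases h0 : ts = 0
  · simp [h0]
    symm; apply qmax_eq_zero
    intro q hq
    obtain ⟨i, hi, hqi⟩ := List.mem_iff_getElem.mp hq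
    have := hcut.2 i hi
    rw [hqi] at this
    simp [h0] at this
    omega
  · simp only [h0, ne_eq, not_false_iff, if_true]
    have hts1 : ts - 1 < env.length := by have := hcut.1; omega
    rw [List.getD_eq_getElem env (0, 0) hts1]
    have hTne : env.take ts ≠ [] := by
      have : (env.take ts).length = ts := by simp; have := hcut.1; omega
      intro h; rw [h] at this; simp at this; omega
    have hsplit : env = env.take ts ++ env.drop ts := (List.take_append_drop ts env).symm
    have hq1 : qmax env x = max (qmax (env.take ts) x) (qmax (env.drop ts) x) := by
      conv_lhs => rw [hsplit]
      exact qmax_append _ _ x (fun q hq => by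
        have := hpos q (List.mem_of_mem_drop hq); omega)
    have hqD : qmax (env.drop ts) x = 0 := by
      apply qmax_eq_zero
      intro q hq
      obtain ⟨i, hi, hge, hqi⟩ := mem_drop_idx hq
      have := hcut.2 i hi
      rw [hqi]; intro hc
      have := this.mp hc; omega
    have hqT : qmax (env.take ts) x = ((env.take ts).getLast hTne).2 := by
      apply qmax_all_match _ _ hTne
      · intro q hq
        obtain ⟨i, hi, hlt, hqi⟩ := mem_take_idx hq
        rw [hqi]; exact (hcut.2 i hi).mpr hlt
      · intro q hq
        have := hpos q (List.mem_of_mem_take hq); omega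
      · exact List.Pairwise.imp (fun h => by omega)
          (List.Pairwise.sublist (List.take_sublist ts env) hm)
    have hTlen : (env.take ts).length = ts := by simp; have := hcut.1; omega
    have hlast : ((env.take ts).getLast hTne) = env[ts - 1] := by
      rw [List.getLast_eq_getElem hTne]
      simp only [hTlen]
      exact List.getElem_take
    rw [hq1, hqD, hqT, hlast]
    have h2 : (0:Int) ≤ env[ts-1].2 := by
      have := hpos env[ts-1] (List.getElem_mem hts1); omega
    omega

lemma downclosed_end (env : List (Int × Int)) (hm : Mono env) (x : Int) :
    ∀ i j (hi : i < env.length) (hj : j < env.length), i ≤ j → env[j].1 < x → env[i].1 < x := by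
  intro i j hi hj hij hP
  rcases Nat.lt_or_ge i j with h | h
  · have := (List.pairwise_iff_getElem.mp hm) i j hi hj h
    omega
  · have : i = j := by omega
    subst this; exact hP

lemma downclosed_val (env : List (Int × Int)) (hm : Mono env) (d : Int) :
    ∀ i j (hi : i < env.length) (hj : j < env.length), i ≤ j → env[j].2 ≤ d → env[i].2 ≤ d := by
  intro i j hi hj hij hP
  rcases Nat.lt_or_ge i j with h | h
  · have := (List.pairwise_iff_getElem.mp hm) i j hi hj h
    omega
  · have : i = j := by omega
    subst this; exact hP

lemma stepB_step (env : List (Int × Int)) (b : Int) (p : Int × Int)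
    (hm : Mono env) (hpos : PosL env) :
    (stepB (env, b) p).2 = (if qmax env p.1 + 1 > b then qmax env p.1 + 1 else b) ∧
    Mono (stepB (env, b) p).1 ∧ PosL (stepB (env, b) p).1 ∧
    ∀ x, qmax (stepB (env, b) p).1 x =
      if p.2 < x then max (qmax env x) (qmax env p.1 + 1) else qmax env x := by
  obtain ⟨ts, hts⟩ := exists_cut (fun q => q.1 < p.1) env (downclosed_end env hm p.1)
  obtain ⟨te, hte⟩ := exists_cut (fun q => q.1 < p.2) env (downclosed_end env hm p.2)
  set d : Int := qmax env p.1 + 1 with hdDef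
  obtain ⟨tv, htv⟩ := exists_cut (fun q => q.2 ≤ d) env (downclosed_val env hm d)
  have hd1 : 1 ≤ d := by have := qmax_nonneg env p.1; omega
  have hbs1 : bsLt env p.1 0 env.length = ts :=
    bsLt_spec env p.1 ts hts env.length 0 env.length (by omega) (by omega) hts.1 (le_refl _)
  have hbs2 : bsLt env p.2 0 env.length = te :=
    bsLt_spec env p.2 te hte env.length 0 env.length (by omega) (by omega) hte.1 (le_refl _)
  have hscan : scanLe env d te = max te tv :=
    scanLe_spec env d tv htv env.length te (by omega) hte.1
  have hstep : stepB (env, b) p =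
      ((if te ≠ 0 ∧ d ≤ (env.getD (te - 1) (0, 0)).2 then env
        else env.take te ++ (p.2, d) :: env.drop (max te tv)),
       if d > b then d else b) := by
    have hdval' : (if ts ≠ 0 then (env.getD (ts - 1) (0, 0)).2 else 0) + 1 = d := by
      rw [cut_query env p.1 ts hm hpos hts]
    unfold stepB
    simp only [hbs1, hbs2]
    rw [hdval', hscan]
  rw [hstep]
  by_cases hdom : te ≠ 0 ∧ d ≤ (env.getD (te - 1) (0, 0)).2
  · rw [if_pos hdom]
    refine ⟨rfl, hm, hpos, ?_⟩
    intro x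
    by_cases hx : p.2 < x
    · rw [if_pos hx]
      show qmax env x = max (qmax env x) (qmax env p.1 + 1)
      have hte1 : te - 1 < env.length := by have := hte.1; omega
      have hv : env[te-1].1 < p.2 := (hte.2 _ hte1).mpr (by omega)
      have hle : env[te-1].2 ≤ qmax env x :=
        le_qmax_of_mem env x _ (List.getElem_mem hte1) (by omega)
      have hdle : d ≤ (env.getD (te-1) (0,0)).2 := hdom.2
      rw [List.getD_eq_getElem env (0,0) hte1] at hdle
      have hd' : qmax env p.1 + 1 ≤ qmax env x := by rw [← hdDef]; omega
      exact (max_eq_left hd').symm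
    · rw [if_neg hx]
  · rw [if_neg hdom]
    have httv : te ≤ tv := by
      rcases Nat.eq_zero_or_pos te with h0 | h0
      · omega
      · have hte1 : te - 1 < env.length := by have := hte.1; omega
        have hvd : ¬ d ≤ (env.getD (te-1) (0,0)).2 := fun hle => hdom ⟨by omega, hle⟩
        rw [List.getD_eq_getElem env (0,0) hte1] at hvd
        have := (htv.2 _ hte1).mp (by omega)
        omega
    have hmax : max te tv = tv := by omega
    rw [hmax]
    have hTprop : ∀ q ∈ env.take te, q.1 < p.2 ∧ q.2 < d ∧ 1 ≤ q.2 := by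
      intro q hq
      obtain ⟨i, hi, hlt, hqi⟩ := mem_take_idx hq
      rw [hqi]
      refine ⟨(hte.2 i hi).mpr hlt, ?_, hpos _ (List.getElem_mem hi)⟩
      have hte0 : te ≠ 0 := by omega
      have hte1 : te - 1 < env.length := by have := hte.1; omega
      have hvd : ¬ d ≤ (env.getD (te-1) (0,0)).2 := fun hle => hdom ⟨hte0, hle⟩
      rw [List.getD_eq_getElem env (0,0) hte1] at hvd
      have hmono : env[i].2 ≤ env[te-1].2 := by
        rcases Nat.lt_or_ge i (te-1) with h | h
        · exact le_of_lt ((List.pairwise_iff_getElem.mp hm) i (te-1) hi hte1 h).2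
        · have hieq : i = te - 1 := by omega
          subst hieq; exact le_refl _
      omega
    have hDprop : ∀ q ∈ env.drop tv, p.2 ≤ q.1 ∧ d < q.2 ∧ 1 ≤ q.2 := by
      intro q hq
      obtain ⟨i, hi, hge, hqi⟩ := mem_drop_idx hq
      rw [hqi]
      have h1 : ¬ env[i].1 < p.2 := fun hc => by have := (hte.2 i hi).mp hc; omega
      have h2 : ¬ env[i].2 ≤ d := fun hc => by have := (htv.2 i hi).mp hc; omega
      exact ⟨by omega, by omega, hpos _ (List.getElem_mem hi)⟩
    refine ⟨rfl, ?_, ?_, ?_⟩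
    · unfold Mono
      rw [List.pairwise_append]
      refine ⟨List.Pairwise.sublist (List.take_sublist te env) hm, ?_, ?_⟩
      · rw [List.pairwise_cons]
        exact ⟨fun q hq => ⟨(hDprop q hq).1, (hDprop q hq).2.1⟩,
               List.Pairwise.sublist (List.drop_sublist tv env) hm⟩
      · intro a ha c hc
        rcases List.mem_cons.mp hc with hc | hc
        · subst hc; exact ⟨le_of_lt (hTprop a ha).1, (hTprop a ha).2.1⟩
        · have h1 := hTprop a ha; have h2 := hDprop c hc
          exact ⟨by omega, by omega⟩
    · intro q hq
      rcases List.mem_append.mp hq with h | h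
      · exact (hTprop q h).2.2
      · rcases List.mem_cons.mp h with h | h
        · rw [h]; exact hd1
        · exact (hDprop q h).2.2
    · intro x
      have hsplit : env = env.take te ++ ((env.drop te).take (tv - te) ++ env.drop tv) := by
        conv_lhs => rw [← List.take_append_drop te env]
        congr 1
        conv_lhs => rw [← List.take_append_drop (tv - te) (env.drop te)]
        congr 1
        rw [List.drop_drop]
        congr 1
        omega
      have hMprop : ∀ q ∈ (env.drop te).take (tv - te), p.2 ≤ q.1 ∧ q.2 ≤ d ∧ 0 ≤ q.2 := by
        intro q hq
        obtain ⟨i, hi, hlt, hqi⟩ := mem_take_idx hq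
        have hlen : te + i < env.length := by
          simp at hi; omega
        have hqi2 : q = env[te + i] := by
          rw [hqi]; exact List.getElem_drop
        rw [hqi2]
        have h1 : ¬ env[te+i].1 < p.2 := fun hc => by have := (hte.2 _ hlen).mp hc; omega
        have h2 : env[te+i].2 ≤ d := (htv.2 _ hlen).mpr (by omega)
        have h3 := hpos _ (List.getElem_mem hlen)
        exact ⟨by omega, h2, by omega⟩
      have hposTD : ∀ q ∈ (env.drop te).take (tv - te) ++ env.drop tv, (0:Int) ≤ q.2 := by
        intro q hq
        rcases List.mem_append.mp hq with h | h
        · exact (hMprop q h).2.2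
        · have := (hDprop q h).2.2; omega
      have hq1 : qmax env x = max (qmax (env.take te) x)
          (max (qmax ((env.drop te).take (tv - te)) x) (qmax (env.drop tv) x)) := by
        conv_lhs => rw [hsplit]
        rw [qmax_append _ _ x hposTD,
            qmax_append _ _ x (fun q hq => by have := (hDprop q hq).2.2; omega)]
      have hq2 : qmax (env.take te ++ (p.2, d) :: env.drop tv) x =
          max (qmax (env.take te) x) (max (qmax [(p.2, d)] x) (qmax (env.drop tv) x)) := by
        rw [show (p.2, d) :: env.drop tv = [(p.2, d)] ++ env.drop tv from rfl]
        rw [qmax_append _ _ x (fun q hq => by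
              rcases List.mem_append.mp hq with h | h
              · rcases List.mem_singleton.mp h with h; rw [h]; omega
              · have := (hDprop q h).2.2; omega),
            qmax_append _ _ x (fun q hq => by have := (hDprop q hq).2.2; omega)]
      rw [hq1, hq2, qmax_singleton]
      have hqT := qmax_nonneg (env.take te) x
      have hqM := qmax_nonneg ((env.drop te).take (tv - te)) x
      have hqD := qmax_nonneg (env.drop tv) x
      by_cases hx : p.2 < x
      · rw [if_pos hx, if_pos hx]
        have hMle : qmax ((env.drop te).take (tv - te)) x ≤ d :=
          qmax_le _ x d (by omega) (fun q hq _ => (hMprop q hq).2.1)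
        simp only [max_def]
        split_ifs <;> omega
      · rw [if_neg hx, if_neg hx]
        have hM0 : qmax ((env.drop te).take (tv - te)) x = 0 :=
          qmax_eq_zero _ x (fun q hq => by have := (hMprop q hq).1; omega)
        rw [hM0]

lemma runB_eq (pairs : List (Int × Int)) :
    ∀ env b ds, Mono env → PosL env → PosL ds → (∀ x, qmax env x = qmax ds x) →
    (pairs.foldl stepB (env, b)).2 = (pairs.foldl stepR (ds, b)).2 := by
  induction pairs with
  | nil => intro env b ds _ _ _ _; rfl
  | cons p t ih =>
    intro env b ds hm hpos hds hrep
    simp only [List.foldl_cons]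
    obtain ⟨h1, h2, h3, h4⟩ := stepB_step env b p hm hpos
    have hd : qmax env p.1 = qmax ds p.1 := hrep p.1
    have hstepR : stepR (ds, b) p =
        (ds ++ [(p.2, qmax ds p.1 + 1)],
         if qmax ds p.1 + 1 > b then qmax ds p.1 + 1 else b) := rfl
    have hpair : t.foldl stepB (stepB (env, b) p) =
        t.foldl stepB ((stepB (env, b) p).1,
          if qmax env p.1 + 1 > b then qmax env p.1 + 1 else b) := by
      rw [← h1]
    rw [hpair, hstepR, hd]
    apply ih _ _ _ h2 h3
    · intro q hq
      rcases List.mem_append.mp hq with h | h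
      · exact hds q h
      · rw [List.mem_singleton.mp h]
        have := qmax_nonneg ds p.1; simp; omega
    · intro x
      rw [h4 x]
      rw [qmax_append ds _ x (fun q hq => by
            rw [List.mem_singleton.mp hq]
            have := qmax_nonneg ds p.1; simp; omega),
          qmax_singleton]
      by_cases hx : p.2 < x
      · rw [if_pos hx, if_pos hx, hrep x, hd]
        have hmx : max 0 (qmax ds p.1 + 1) = qmax ds p.1 + 1 :=
          max_eq_right (by have := qmax_nonneg ds p.1; omega)
        rw [hmx]
      · rw [if_neg hx, if_neg hx, hrep x]
        exact (max_eq_left (qmax_nonneg ds x)).symm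

lemma alt_eq_runR (pairs : List (Int × Int)) :
    findLongestChain_dp_alt pairs = (runR pairs).2 := by
  unfold findLongestChain_dp_alt runR
  exact runB_eq pairs [] 0 [] List.Pairwise.nil (by intro q h; simp at h)
    (by intro q h; simp at h) (fun x => rfl)

-- ===== A side =====

lemma runR_append (ps : List (Int × Int)) (p : Int × Int) :
    runR (ps ++ [p]) = stepR (runR ps) p := by
  unfold runR; rw [List.foldl_append]; rfl

lemma runR_len (pairs : List (Int × Int)) : (runR pairs).1.length = pairs.length := by
  induction pairs using List.reverseRecOn with
  | nil => rfl
  | append_singleton ps p ih =>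
    rw [runR_append]
    show ((runR ps).1 ++ [_]).length = _
    simp [ih]

lemma runR_pos (pairs : List (Int × Int)) : PosL (runR pairs).1 := by
  induction pairs using List.reverseRecOn with
  | nil => intro q hq; simp [runR] at hq
  | append_singleton ps p ih =>
    rw [runR_append]
    intro q hq
    rcases List.mem_append.mp hq with h | h
    · exact ih q h
    · rw [List.mem_singleton.mp h]
      have := qmax_nonneg (runR ps).1 p.1; simp; omega

lemma runR_ends (pairs : List (Int × Int)) :
    (runR pairs).1.map Prod.fst = pairs.map Prod.snd := by
  induction pairs using List.reverseRecOn with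
  | nil => rfl
  | append_singleton ps p ih =>
    rw [runR_append]
    show ((runR ps).1 ++ [_]).map Prod.fst = _
    simp [ih]

lemma getD_append_left {l l2 : List Int} {m : Nat} (d : Int) (h : m < l.length) :
    (l ++ l2).getD m d = l.getD m d := by
  simp [List.getD_eq_getElem?_getD, List.getElem?_append_left h]

lemma getDp_append_left {l l2 : List (Int × Int)} {m : Nat} (d : Int × Int) (h : m < l.length) :
    (l ++ l2).getD m d = l.getD m d := by
  simp [List.getD_eq_getElem?_getD, List.getElem?_append_left h]

lemma innerA_len (ps : List (Int × Int)) (i : Int) :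
    ∀ dp : List Int, (innerA ps dp i).length = dp.length := by
  unfold innerA
  generalize PySem.List.pyRange 0 i 1 = L
  induction L with
  | nil => intro dp; rfl
  | cons j t ih =>
    intro dp
    simp only [List.foldl_cons]
    rw [ih]
    split
    · rw [PySem.List.length_pySetD]
    · rfl

lemma foldl_snoc_lift (L : List Int) (g g' : List Int → Int → List Int) (y : Int) (n : Nat)
    (hstep : ∀ dp j, j ∈ L → dp.length = n →
      g' (dp ++ [y]) j = g dp j ++ [y] ∧ (g dp j).length = n) :
    ∀ dp : List Int, dp.length = n → L.foldl g' (dp ++ [y]) = L.foldl g dp ++ [y] := by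
  induction L with
  | nil => intro dp _; rfl
  | cons j t ih =>
    intro dp hdp
    simp only [List.foldl_cons]
    obtain ⟨h1, h2⟩ := hstep dp j (by simp) hdp
    rw [h1]
    exact ih (fun dp j hj hdp => hstep dp j (by simp [hj]) hdp) _ h2

lemma innerA_snoc (ps : List (Int × Int)) (p : Int × Int) (y : Int) (i : Int)
    (hi0 : 0 ≤ i) (hin : i < (ps.length : Int)) (dp : List Int) (hdp : dp.length = ps.length) :
    innerA (ps ++ [p]) (dp ++ [y]) i = innerA ps dp i ++ [y] := by
  unfold innerA
  apply foldl_snoc_lift _ _ _ y ps.length _ dp hdp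
  intro dp' j hj hdp'
  have hj' := PySem.List.mem_pyRange_one.mp hj
  have hjn : j.toNat < ps.length := by omega
  have hitn : i.toNat < ps.length := by omega
  have hppj : PySem.List.pyGetD (ps ++ [p]) j (0, 0) = PySem.List.pyGetD ps j (0, 0) := by
    rw [PySem.List.pyGetD_of_nonneg _ _ (by omega), PySem.List.pyGetD_of_nonneg _ _ (by omega),
        getDp_append_left _ hjn]
  have hppi : PySem.List.pyGetD (ps ++ [p]) i (0, 0) = PySem.List.pyGetD ps i (0, 0) := by
    rw [PySem.List.pyGetD_of_nonneg _ _ hi0, PySem.List.pyGetD_of_nonneg _ _ hi0,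
        getDp_append_left _ hitn]
  have hdj : PySem.List.pyGetD (dp' ++ [y]) j 0 = PySem.List.pyGetD dp' j 0 := by
    rw [PySem.List.pyGetD_of_nonneg _ _ (by omega), PySem.List.pyGetD_of_nonneg _ _ (by omega),
        getD_append_left _ (by omega)]
  have hdi : PySem.List.pyGetD (dp' ++ [y]) i 0 = PySem.List.pyGetD dp' i 0 := by
    rw [PySem.List.pyGetD_of_nonneg _ _ hi0, PySem.List.pyGetD_of_nonneg _ _ hi0,
        getD_append_left _ (by omega)]
  have hset : ∀ v, PySem.List.pySetD (dp' ++ [y]) i v = PySem.List.pySetD dp' i v ++ [y] := by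
    intro v
    rw [PySem.List.pySetD_of_nonneg _ _ hi0, PySem.List.pySetD_of_nonneg _ _ hi0,
        List.set_append_left _ _ (by omega)]
  constructor
  · rw [hppj, hppi, hdj, hdi]
    split
    · exact hset _
    · rfl
  · split
    · rw [PySem.List.length_pySetD, hdp']
    · exact hdp'

lemma getD_append_self (l : List Int) (y d : Int) : (l ++ [y]).getD l.length d = y := by
  simp [List.getD_eq_getElem?_getD]

lemma getDp_append_self (l : List (Int × Int)) (y d : Int × Int) :
    (l ++ [y]).getD l.length d = y := by
  simp [List.getD_eq_getElem?_getD]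

lemma inner_acc (ps : List (Int × Int)) (p : Int × Int) (dpv : List Int)
    (hdpv : dpv.length = ps.length) :
    ∀ (m : Nat), m ≤ ps.length → ∀ a : Int,
    (PySem.List.pyRange 0 (m : Int) 1).foldl
      (fun dp j =>
        if (PySem.List.pyGetD (ps ++ [p]) j (0, 0)).2 <
            (PySem.List.pyGetD (ps ++ [p]) ((ps.length : Int)) (0, 0)).1 then
          PySem.List.pySetD dp ((ps.length : Int))
            (max (PySem.List.pyGetD dp ((ps.length : Int)) 0) (PySem.List.pyGetD dp j 0 + 1))
        else dp) (dpv ++ [a]) =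
    dpv ++ [(PySem.List.pyRange 0 (m : Int) 1).foldl
      (fun a j =>
        if (PySem.List.pyGetD (ps ++ [p]) j (0, 0)).2 <
            (PySem.List.pyGetD (ps ++ [p]) ((ps.length : Int)) (0, 0)).1 then
          max a (PySem.List.pyGetD dpv j 0 + 1)
        else a) a] := by
  intro m
  induction m with
  | zero =>
    intro _ a
    rw [PySem.List.pyRange_one_eq_nil (by omega)]
    rfl
  | succ k ih =>
    intro hk a
    have hcast : ((k + 1 : Nat) : Int) = (k : Int) + 1 := by push_cast; ring
    rw [hcast, PySem.List.pyRange_one_succ_right (by omega), List.foldl_append,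
        List.foldl_append, ih (by omega) a]
    simp only [List.foldl_cons, List.foldl_nil]
    have hgn : ∀ a' : Int, PySem.List.pyGetD (dpv ++ [a']) ((ps.length : Int)) 0 = a' := by
      intro a'
      rw [PySem.List.pyGetD_of_nonneg _ _ (by omega)]
      rw [show ((ps.length : Int)).toNat = dpv.length by omega]
      exact getD_append_self _ _ _
    have hgk : ∀ a' : Int, PySem.List.pyGetD (dpv ++ [a']) ((k : Int)) 0 =
        PySem.List.pyGetD dpv ((k : Int)) 0 := by
      intro a'
      rw [PySem.List.pyGetD_of_nonneg _ _ (by omega), PySem.List.pyGetD_of_nonneg _ _ (by omega)]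
      exact getD_append_left _ (by omega)
    have hsetn : ∀ a' v : Int, PySem.List.pySetD (dpv ++ [a']) ((ps.length : Int)) v =
        dpv ++ [v] := by
      intro a' v
      rw [PySem.List.pySetD_of_nonneg _ _ (by omega)]
      rw [show ((ps.length : Int)).toNat = dpv.length by omega]
      rw [List.set_append_right _ _ (le_refl _)]
      simp
    split
    · rw [hgn, hgk, hsetn]
    · rfl

lemma fold_plus1 (l : List (Int × Int)) (x : Int) :
    ∀ a : Int, l.foldl (fun a q => if q.1 < x then max a (q.2 + 1) else a) (a + 1) =
      l.foldl (qstep x) a + 1 := by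
  induction l with
  | nil => intro a; rfl
  | cons q t ih =>
    intro a
    simp only [List.foldl_cons]
    by_cases hc : q.1 < x
    · rw [if_pos hc, show qstep x a q = max a q.2 from by unfold qstep; rw [if_pos hc]]
      rw [show max (a + 1) (q.2 + 1) = max a q.2 + 1 from Int.max_add_right a q.2 1]
      exact ih _
    · rw [if_neg hc, show qstep x a q = a from by unfold qstep; rw [if_neg hc]]
      exact ih _

lemma innerA_last (ps : List (Int × Int)) (p : Int × Int) :
    innerA (ps ++ [p]) ((runR ps).1.map Prod.snd ++ [1]) ((ps.length : Int)) =
    (runR ps).1.map Prod.snd ++ [qmax (runR ps).1 p.1 + 1] := by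
  set ds := (runR ps).1 with hds
  have hlen : ds.length = ps.length := runR_len ps
  have hdpv : (ds.map Prod.snd).length = ps.length := by simp [hlen]
  unfold innerA
  rw [inner_acc ps p (ds.map Prod.snd) hdpv ps.length (le_refl _) 1]
  congr 1
  have hpn : PySem.List.pyGetD (ps ++ [p]) ((ps.length : Int)) (0, 0) = p := by
    rw [PySem.List.pyGetD_of_nonneg _ _ (by omega)]
    rw [show ((ps.length : Int)).toNat = ps.length by omega]
    exact getDp_append_self _ _ _
  have hcongr : (PySem.List.pyRange 0 ((ps.length : Int)) 1).foldl
      (fun a j =>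
        if (PySem.List.pyGetD (ps ++ [p]) j (0, 0)).2 <
            (PySem.List.pyGetD (ps ++ [p]) ((ps.length : Int)) (0, 0)).1 then
          max a (PySem.List.pyGetD (ds.map Prod.snd) j 0 + 1)
        else a) 1 =
      (PySem.List.pyRange 0 ((ps.length : Int)) 1).foldl
      (fun a j =>
        (fun q : Int × Int => if q.1 < p.1 then max a (q.2 + 1) else a)
          (PySem.List.pyGetD ds j (0, 0))) 1 := by
    apply PySem.List.foldl_congr_mem
    intro a j hj
    have hj' := PySem.List.mem_pyRange_one.mp hj
    have hj1 : j.toNat < ds.length := by omega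
    have hj2 : j.toNat < ps.length := by omega
    have hfst : ds[j.toNat].1 = ps[j.toNat].2 := by
      have h3 : (List.map Prod.fst ds)[j.toNat]'(by simpa using hj1) =
          (List.map Prod.snd ps)[j.toNat]'(by simpa using hj2) :=
        List.getElem_of_eq (runR_ends ps) _
      simpa using h3
    have hsnd : (ds.map Prod.snd).getD j.toNat 0 = ds[j.toNat].2 := by
      rw [List.getD_eq_getElem _ _ (by simpa using hj1)]
      exact List.getElem_map Prod.snd
    rw [hpn]
    have hcond : (PySem.List.pyGetD (ps ++ [p]) j (0, 0)).2 =
        (PySem.List.pyGetD ds j (0, 0)).1 := by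
      rw [PySem.List.pyGetD_of_nonneg _ _ (by omega), PySem.List.pyGetD_of_nonneg _ _ (by omega),
          getDp_append_left _ hj2, List.getD_eq_getElem _ _ hj2, List.getD_eq_getElem _ _ hj1,
          hfst]
    have hval : PySem.List.pyGetD (ds.map Prod.snd) j 0 = (PySem.List.pyGetD ds j (0, 0)).2 := by
      rw [PySem.List.pyGetD_of_nonneg _ _ (by omega), PySem.List.pyGetD_of_nonneg _ _ (by omega),
          hsnd, List.getD_eq_getElem _ _ hj1]
    rw [hcond, hval]
  rw [hcongr]
  rw [show ((ps.length : Int)) = ((ds.length : Int)) by rw [hlen]]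
  rw [PySem.List.foldl_pyRange_zero_pyGetD' ds (0, 0)
    (fun a q => if q.1 < p.1 then max a (q.2 + 1) else a) 1]
  have hfp := fold_plus1 ds p.1 0
  rw [zero_add] at hfp
  rw [hfp]
  rfl

lemma A_dp (pairs : List (Int × Int)) :
    (PySem.List.pyRange 0 (PySem.List.len pairs) 1).foldl (innerA pairs)
      (List.replicate pairs.length 1) = (runR pairs).1.map Prod.snd := by
  induction pairs using List.reverseRecOn with
  | nil =>
    rw [show PySem.List.len ([] : List (Int × Int)) = 0 from rfl,
        PySem.List.pyRange_one_eq_nil (by omega)]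
    rfl
  | append_singleton ps p ih =>
    have hn : PySem.List.len (ps ++ [p]) = (ps.length : Int) + 1 := by
      simp [PySem.List.len_eq]
    rw [hn, PySem.List.pyRange_one_succ_right (by omega), List.foldl_append]
    have hrep : List.replicate (ps ++ [p]).length (1 : Int) =
        List.replicate ps.length 1 ++ [1] := by
      simp [List.replicate_succ']
    rw [hrep]
    have hlift : (PySem.List.pyRange 0 ((ps.length : Int)) 1).foldl (innerA (ps ++ [p]))
        (List.replicate ps.length 1 ++ [1]) =
        (PySem.List.pyRange 0 ((ps.length : Int)) 1).foldl (innerA ps)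
          (List.replicate ps.length 1) ++ [1] := by
      apply foldl_snoc_lift _ _ _ 1 ps.length _ _ (by simp)
      intro dp j hj hdp
      have hj' := PySem.List.mem_pyRange_one.mp hj
      exact ⟨innerA_snoc ps p 1 j (by omega) (by omega) dp hdp,
        by rw [innerA_len]; exact hdp⟩
    rw [hlift]
    have hpre : (PySem.List.pyRange 0 ((ps.length : Int)) 1).foldl (innerA ps)
        (List.replicate ps.length 1) = (runR ps).1.map Prod.snd := by
      have := ih
      rw [show PySem.List.len ps = ((ps.length : Int)) from by simp [PySem.List.len_eq]] at this
      exact this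
    rw [hpre]
    simp only [List.foldl_cons, List.foldl_nil]
    rw [innerA_last ps p, runR_append]
    show _ = ((runR ps).1 ++ [(p.2, qmax (runR ps).1 p.1 + 1)]).map Prod.snd
    simp

lemma runR_best (pairs : List (Int × Int)) :
    (runR pairs).2 = ((runR pairs).1.map Prod.snd).foldl
      (fun b v => if v > b then v else b) 0 := by
  induction pairs using List.reverseRecOn with
  | nil => rfl
  | append_singleton ps p ih =>
    rw [runR_append]
    show (if qmax (runR ps).1 p.1 + 1 > (runR ps).2 then qmax (runR ps).1 p.1 + 1
          else (runR ps).2) = (((runR ps).1 ++ [(p.2, qmax (runR ps).1 p.1 + 1)]).map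
            Prod.snd).foldl (fun b v => if v > b then v else b) 0
    rw [List.map_append, List.foldl_append, ← ih]
    rfl

lemma max?_cons_foldl (t : List Int) :
    ∀ a : Int, PySem.List.max? (a :: t) (fun v => v) =
      some (t.foldl (fun b v => if v > b then v else b) a) := by
  induction t with
  | nil => intro a; rfl
  | cons v t ih =>
    intro a
    have h1 : PySem.List.max? (a :: v :: t) (fun x => x) =
        PySem.List.max? ((if v > a then v else a) :: t) (fun x => x) := by
      unfold PySem.List.max?
      simp only [List.foldl_cons]
      by_cases h : a < v <;> simp [h]
    rw [h1, ih]
    simp only [List.foldl_cons]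

lemma max?_foldl (vals : List Int) (hne : vals ≠ []) (hpos : ∀ v ∈ vals, 1 ≤ v) :
    (PySem.List.max? vals (fun v => v)).getD 0 =
      vals.foldl (fun b v => if v > b then v else b) 0 := by
  cases vals with
  | nil => exact absurd rfl hne
  | cons v t =>
    rw [max?_cons_foldl t v]
    simp only [List.foldl_cons, Option.getD_some]
    rw [show ((if v > (0:Int) then v else 0) : Int) = v from by
      have := hpos v (by simp); simp [show v > (0:Int) by omega]]

lemma A_eq (pairs : List (Int × Int)) (hne : pairs ≠ []) :
    findLongestChain_dp pairs = (runR pairs).2 := by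
  simp only [findLongestChain_dp]
  rw [A_dp]
  rw [max?_foldl _ (by
        intro h
        apply hne
        have := runR_len pairs
        rw [show (runR pairs).1 = [] from by
          cases hh : (runR pairs).1 with
          | nil => rfl
          | cons a b => rw [hh] at h; simp at h] at this
        simp at this
        exact List.eq_nil_of_length_eq_zero this.symm)
      (by
        intro v hv
        obtain ⟨q, hq, hqv⟩ := List.mem_map.mp hv
        rw [← hqv]
        exact runR_pos pairs q hq)]
  rw [← runR_best]

-- ===== VERDICT (by name: the statement is the Claim_ definition above) =====
theorem findLongestChain_dp_spec : Claim_equal_findLongestChain_dp := by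
  intro pairs _ hpre
  unfold Spec_findLongestChain_dp
  rw [A_eq pairs hpre, alt_eq_runR]
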